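-- pv_equiv track=rewrite | github.com/Anarocha25/Grafos20221 | coloracao.py | conjuntos_ind_max
-- ===== SOURCE A (Python) =====
-- import itertools
--
-- def subconjuntos_possiveis(lista_vertices):
--     combinations = []
--     for r in range(len(lista_vertices)+1):
--         for combination in itertools.combinations(lista_vertices, r):
--             if len(combination) > 0:
--                 combinations.append(list(combination))
--     return combinations
--
-- def conjuntos_ind_max(vertices_G, arestas_G):
--     sub_S = subconjuntos_possiveis(vertices_G)
--     R = []
--     for X in reversed(sub_S):
--         c = True
--         for v in X:
--             for u in X:
--                 if (u,v) in arestas_G: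
--                     c = False
--         if c:
--             R.append(X)
--     return R
-- ===== SOURCE B (Python) =====
-- def conjuntos_ind_max(vertices_G, arestas_G):
--     # Backtracking over suffixes: only independent extensions are explored,
--     # so the per-subset quadratic re-check of A disappears.
--     def conflicts(S, w):
--         if (w, w) in arestas_G:
--             return True
--         for x in S:
--             if (w, x) in arestas_G or (x, w) in arestas_G:
--                 return True
--         return False
--
--     def bt(suffix, S):
--         out = []
--         for j, w in enumerate(suffix):
--             if not conflicts(S, w):
--                 T = S + [w]
--                 out.append(T)
--                 out.extend(bt(suffix[j + 1:], T))
--         return out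
--
--     acc = bt(vertices_G, [])
--     R = []
--     for r in range(len(vertices_G), 0, -1):
--         grp = [S for S in acc if len(S) == r]
--         grp.reverse()
--         R.extend(grp)
--     return R
-- ===== Notes on version B (the rewrite author's own statement) =====
-- stated objective: faster
-- what changed: B replaces A's generate-all-2^n-subsets-then-quadratic-check with a backtracking enumeration over suffixes that only extends independent partial sets (incremental conflict check), then emits the collected sets grouped by size descending.
import Mathlib
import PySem

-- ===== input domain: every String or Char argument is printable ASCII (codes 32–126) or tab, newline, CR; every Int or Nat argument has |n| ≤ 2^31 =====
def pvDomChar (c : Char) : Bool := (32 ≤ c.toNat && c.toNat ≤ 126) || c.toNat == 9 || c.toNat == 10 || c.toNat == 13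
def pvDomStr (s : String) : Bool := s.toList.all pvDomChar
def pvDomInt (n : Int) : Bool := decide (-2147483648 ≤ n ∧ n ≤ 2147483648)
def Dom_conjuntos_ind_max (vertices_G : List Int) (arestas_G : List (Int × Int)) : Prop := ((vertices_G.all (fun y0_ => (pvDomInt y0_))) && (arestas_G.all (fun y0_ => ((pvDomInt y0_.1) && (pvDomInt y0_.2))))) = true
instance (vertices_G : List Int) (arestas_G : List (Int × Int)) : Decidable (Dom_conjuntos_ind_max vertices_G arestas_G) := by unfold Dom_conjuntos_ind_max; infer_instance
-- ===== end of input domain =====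

-- B enumerates only independent sets by backtracking with an incremental conflict
-- check instead of generating all 2^n subsets and re-checking each quadratically.

-- ===== PORT A =====
-- helper subconjuntos_possiveis: all nonempty subsets, by size then lexicographic
def pvSubconjuntos (lista_vertices : List Int) : List (List Int) :=
  (PySem.List.pyRange 0 (lista_vertices.length + 1) 1).foldl
    (fun acc r =>
      (PySem.List.combinations lista_vertices r.toNat).foldl
        (fun acc2 combination => if 0 < combination.length then acc2 ++ [combination] else acc2) acc)
    []

-- the nested c-loop of A: c starts True, set to False whenever (u,v) ∈ arestas
def pvCheck (arestas_G : List (Int × Int)) (X : List Int) : Bool :=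
  X.foldl (fun c v => X.foldl (fun c u => if arestas_G.contains (u, v) then false else c) c) true

def conjuntos_ind_max (vertices_G : List Int) (arestas_G : List (Int × Int)) : List (List Int) :=
  let sub_S := pvSubconjuntos vertices_G
  sub_S.reverse.foldl (fun R X => if pvCheck arestas_G X then R ++ [X] else R) []

-- ===== PORT B =====
def pvConflicts (arestas_G : List (Int × Int)) (S : List Int) (w : Int) : Bool :=
  arestas_G.contains (w, w) || S.any (fun x => arestas_G.contains (w, x) || arestas_G.contains (x, w))

-- bt(suffix, S): DFS over the suffix, only extending conflict-free sets
def pvBT (arestas_G : List (Int × Int)) : List Int → List Int → List (List Int)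
  | [], _S => []
  | w :: rest, S =>
    (if pvConflicts arestas_G S w then [] else (S ++ [w]) :: pvBT arestas_G rest (S ++ [w]))
      ++ pvBT arestas_G rest S

def conjuntos_ind_max_alt (vertices_G : List Int) (arestas_G : List (Int × Int)) : List (List Int) :=
  let acc := pvBT arestas_G vertices_G []
  (PySem.List.pyRange (vertices_G.length : Int) 0 (-1)).foldl
    (fun R r => R ++ (acc.filter (fun S => (S.length : Int) == r)).reverse) []

-- ===== PRECONDITION & SPEC =====
def Spec_conjuntos_ind_max (vertices_G : List Int) (arestas_G : List (Int × Int)) (out : List (List Int)) : Prop := out = conjuntos_ind_max_alt vertices_G arestas_G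
instance (vertices_G : List Int) (arestas_G : List (Int × Int)) (out : List (List Int)) : Decidable (Spec_conjuntos_ind_max vertices_G arestas_G out) := by unfold Spec_conjuntos_ind_max; infer_instance

-- ===== CLAIM (what is proved, stated in full; the proofs are below) =====
def Claim_equal_conjuntos_ind_max : Prop := ∀ (vertices_G : List Int) (arestas_G : List (Int × Int)), Dom_conjuntos_ind_max vertices_G arestas_G → Spec_conjuntos_ind_max vertices_G arestas_G (conjuntos_ind_max vertices_G arestas_G)

-- ===== LEMMAS AND PROOFS =====

-- unpruned DFS enumeration: all sets S ++ T for nonempty subsequences T of suffix, in DFS order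
def pvSubsFrom : List Int → List Int → List (List Int)
  | [], _S => []
  | w :: rest, S => (S ++ [w]) :: (pvSubsFrom rest (S ++ [w]) ++ pvSubsFrom rest S)

lemma pv_foldl_if_false {α : Type} (p : α → Bool) : ∀ (l : List α) (c : Bool),
    l.foldl (fun c u => if p u then false else c) c = (c && !l.any p)
  | [], c => by simp
  | a :: l, c => by
    have := pv_foldl_if_false p l (if p a then false else c)
    simp only [List.foldl_cons, this, List.any_cons]
    cases p a <;> simp

lemma pv_foldl_band {α : Type} (q : α → Bool) : ∀ (l : List α) (c : Bool),
    l.foldl (fun c v => c && q v) c = (c && l.all q)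
  | [], c => by simp
  | a :: l, c => by
    simp only [List.foldl_cons, pv_foldl_band q l, List.all_cons, Bool.and_assoc]

lemma pvCheck_eq (ar : List (Int × Int)) (X : List Int) :
    pvCheck ar X = !(X.any fun v => X.any fun u => ar.contains (u, v)) := by
  unfold pvCheck
  simp only [pv_foldl_if_false]
  have : (fun (c : Bool) (v : Int) => c && !X.any fun u => ar.contains (u, v))
       = (fun c v => c && (fun v => !X.any fun u => ar.contains (u, v)) v) := rfl
  rw [this, pv_foldl_band]
  simp [List.all_eq_not_any_not]

lemma pvCheck_snoc (ar : List (Int × Int)) (S : List Int) (w : Int) :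
    pvCheck ar (S ++ [w]) = (pvCheck ar S && !pvConflicts ar S w) := by
  rw [Bool.eq_iff_iff]
  simp only [pvCheck_eq, pvConflicts, List.any_append, List.any_cons, List.any_nil,
    Bool.and_eq_true, Bool.not_eq_eq_eq_not, Bool.not_true,
    Bool.or_eq_false_iff, List.any_eq_false, Bool.or_eq_true, List.any_eq_true]
  constructor
  · intro h
    aesop
  · intro h
    aesop

lemma pvCheck_ext_false (ar : List (Int × Int)) (S T : List Int)
    (h : pvCheck ar S = false) : pvCheck ar (S ++ T) = false := by
  simp only [pvCheck_eq, Bool.not_eq_false', List.any_eq_true] at h ⊢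
  obtain ⟨v, hv, u, hu, hc⟩ := h
  exact ⟨v, List.mem_append_left _ hv, u, List.mem_append_left _ hu, hc⟩

lemma pvSubsFrom_shape :
    ∀ (suffix S : List Int), ∀ X ∈ pvSubsFrom suffix S, ∃ T, X = S ++ T ∧ T ≠ []
  | [], S => by simp [pvSubsFrom]
  | w :: rest, S => by
    intro X hX
    simp only [pvSubsFrom, List.mem_cons, List.mem_append] at hX
    rcases hX with h | h | h
    · exact ⟨[w], h, by simp⟩
    · obtain ⟨T, rfl, _⟩ := pvSubsFrom_shape rest (S ++ [w]) X h
      exact ⟨[w] ++ T, by simp, by simp⟩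
    · exact pvSubsFrom_shape rest S X h

lemma pvBT_eq_filter (ar : List (Int × Int)) :
    ∀ (suffix S : List Int), pvCheck ar S = true →
      pvBT ar suffix S = (pvSubsFrom suffix S).filter (pvCheck ar)
  | [], S, h => by simp [pvBT, pvSubsFrom]
  | w :: rest, S, h => by
    simp only [pvBT, pvSubsFrom, List.filter_cons, List.filter_append]
    rcases hc : pvConflicts ar S w with _ | _
    · have hind : pvCheck ar (S ++ [w]) = true := by
        rw [pvCheck_snoc, h, hc]; rfl
      rw [hind, pvBT_eq_filter ar rest (S ++ [w]) hind, pvBT_eq_filter ar rest S h]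
      simp
    · have hind : pvCheck ar (S ++ [w]) = false := by
        rw [pvCheck_snoc, hc]; simp
      have hall : (pvSubsFrom rest (S ++ [w])).filter (pvCheck ar) = [] := by
        rw [List.filter_eq_nil_iff]
        intro X hX
        obtain ⟨T, rfl, _⟩ := pvSubsFrom_shape rest (S ++ [w]) X hX
        have := pvCheck_ext_false ar _ T hind
        simpa using this
      rw [hind, hall, pvBT_eq_filter ar rest S h]
      simp

lemma pvSubsFrom_filter_nil_of_le (S : List Int) (suffix : List Int) (k : Nat) (hk : k ≤ S.length) :
    (pvSubsFrom suffix S).filter (fun X => X.length == k) = [] := by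
  rw [List.filter_eq_nil_iff]
  intro X hX
  obtain ⟨T, rfl, hT⟩ := pvSubsFrom_shape suffix S X hX
  have : T.length ≠ 0 := by simpa using hT
  simp only [List.length_append, beq_iff_eq]
  omega

lemma pvSubsFrom_filter_len :
    ∀ (suffix S : List Int) (k : Nat), S.length < k →
      (pvSubsFrom suffix S).filter (fun X => X.length == k)
        = (PySem.List.combinations suffix (k - S.length)).map (S ++ ·)
  | [], S, k, hk => by
    obtain ⟨m, hm⟩ : ∃ m, k - S.length = m + 1 := ⟨k - S.length - 1, by omega⟩
    simp [pvSubsFrom, hm, PySem.List.combinations_nil_succ]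
  | w :: rest, S, k, hk => by
    obtain ⟨m, hm⟩ : ∃ m, k - S.length = m + 1 := ⟨k - S.length - 1, by omega⟩
    simp only [pvSubsFrom, List.filter_cons, List.filter_append, hm,
      PySem.List.combinations_cons_succ, List.map_append, List.map_map]
    rcases Nat.lt_or_ge (S.length + 1) k with hgt | hle
    · have hhead : (((S ++ [w]).length == k) : Bool) = false := by
        simp only [List.length_append, List.length_cons, List.length_nil, beq_eq_false_iff_ne]
        omega
      have hmid := pvSubsFrom_filter_len rest (S ++ [w]) k (by simp; omega)
      have hm' : k - (S ++ [w]).length = m := by simp; omega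
      rw [hhead, hmid, hm', pvSubsFrom_filter_len rest S k hk, hm]
      simp [Function.comp_def]
    · have hkeq : k = S.length + 1 := by omega
      have hm0 : m = 0 := by omega
      have hhead : (((S ++ [w]).length == k) : Bool) = true := by
        simp [hkeq]
      have hmid : (pvSubsFrom rest (S ++ [w])).filter (fun X => X.length == k) = [] := by
        apply pvSubsFrom_filter_nil_of_le; simp [hkeq]
      rw [hhead, hmid, pvSubsFrom_filter_len rest S k hk, hm, hm0]
      simp [PySem.List.combinations_zero, Function.comp_def]

lemma pvSubconjuntos_eq (vs : List Int) :
    pvSubconjuntos vs = (List.range vs.length).flatMap (fun i => PySem.List.combinations vs (i+1)) := by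
  unfold pvSubconjuntos
  simp only [PySem.List.foldl_append_ite_eq_filter, PySem.List.foldl_append_eq_flatMap]
  rw [PySem.List.pyRange_one]
  have h1 : ((vs.length : Int) + 1 - 0).toNat = vs.length + 1 := by omega
  rw [h1, List.flatMap_map, List.range_succ_eq_map]
  simp only [List.flatMap_cons, List.nil_append]
  have h0 : (PySem.List.combinations vs ((0 : Int) + (0:Nat)).toNat).filter (fun c => decide (0 < c.length)) = [] := by
    norm_num [PySem.List.combinations_zero]
  rw [h0, List.flatMap_map, List.nil_append]
  congr 1
  funext i
  have h2 : ((0:Int) + (Nat.succ i : Nat)).toNat = i + 1 := by omega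
  rw [h2]
  apply List.filter_eq_self.mpr
  intro c hc
  have := PySem.List.length_of_mem_combinations hc
  simp [this]

lemma pv_main (vs : List Int) (ar : List (Int × Int)) :
    conjuntos_ind_max vs ar = conjuntos_ind_max_alt vs ar := by
  have hA : conjuntos_ind_max vs ar
      = ((List.range vs.length).reverse).flatMap
          (fun i => ((PySem.List.combinations vs (i+1)).filter (pvCheck ar)).reverse) := by
    show (pvSubconjuntos vs).reverse.foldl (fun R X => if pvCheck ar X then R ++ [X] else R) [] = _
    rw [PySem.List.foldl_append_if_eq_filter, pvSubconjuntos_eq, List.reverse_flatMap,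
      List.filter_flatMap]
    simp only [List.nil_append, Function.comp_def, List.filter_reverse]
  have hacc : pvBT ar vs [] = (pvSubsFrom vs []).filter (pvCheck ar) :=
    pvBT_eq_filter ar vs [] rfl
  have hB : conjuntos_ind_max_alt vs ar
      = ((List.range vs.length).reverse).flatMap
          (fun i => ((PySem.List.combinations vs (i+1)).filter (pvCheck ar)).reverse) := by
    show (PySem.List.pyRange (vs.length : Int) 0 (-1)).foldl
        (fun R r => R ++ ((pvBT ar vs []).filter (fun S => (S.length : Int) == r)).reverse) [] = _
    rw [PySem.List.foldl_append_eq_flatMap, PySem.List.pyRange_neg_one_eq_reverse,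
      PySem.List.pyRange_one]
    have h1 : ((vs.length:Int) + 1 - (0 + 1)).toNat = vs.length := by omega
    rw [h1, List.nil_append, ← List.map_reverse, List.flatMap_map]
    congr 1
    funext i
    have hp : (fun S : List Int => ((S.length : Int) == 0 + 1 + (i:Int)))
        = (fun S : List Int => S.length == i + 1) := by
      funext S
      rw [Bool.eq_iff_iff]
      simp only [beq_iff_eq]
      omega
    have hfilter : (pvBT ar vs []).filter (fun S => ((S.length : Int) == 0 + 1 + (i:Int)))
        = (PySem.List.combinations vs (i+1)).filter (pvCheck ar) := by
      rw [hacc, hp, List.filter_comm, pvSubsFrom_filter_len vs [] (i+1) (by simp)]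
      simp
    simp only [hfilter]
  rw [hA, hB]

-- ===== VERDICT (by name: the statement is the Claim_ definition above) =====
theorem conjuntos_ind_max_spec : Claim_equal_conjuntos_ind_max := by
  intro vs ar _
  exact pv_main vs ar
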